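-- pv_equiv track=rewrite | github.com/tbarbito/atudic-supreme | app/services/workspace/investigation_loop.py | _group_steps_by_parallelism
-- ===== SOURCE A (Python) =====
-- READ_ONLY_TOOLS = {
--     "quem_grava", "info_tabela", "operacoes_escrita", "rastrear_condicao",
--     "ver_parametro", "ver_fonte_cliente", "buscar_texto_fonte",
--     "buscar_pes_cliente", "mapear_processo", "buscar_menus",
--     "buscar_propositos", "analise_impacto", "analise_aumento_campo",
--     "processos_cliente", "jobs_schedules", "buscar_fontes_tabela",
--     # Padrão tools (read-only by nature)
--     "fonte_padrao", "pes_disponiveis", "codigo_pe", "buscar_funcao_padrao",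
-- }
--
-- def _group_steps_by_parallelism(valid_steps: list) -> list:
--     """Group consecutive read-only steps for parallel execution.
--
--     Returns a list of groups, where each group is a list of (orig_idx, step) tuples.
--     Consecutive read-only steps form a single group (parallelizable).
--     Non-read-only steps each get their own single-item group (sequential).
--     """
--     if not valid_steps:
--         return []
--
--     groups = []
--     current_group = []
--
--     for idx, step in valid_steps:
--         tool_name = step.get("tool", "")
--         is_parallel_safe = tool_name in READ_ONLY_TOOLS
--
--         if is_parallel_safe:
--             current_group.append((idx, step))
--         else:
--             # Flush any accumulated read-only group
--             if current_group:
--                 groups.append(current_group)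
--                 current_group = []
--             # Non-read-only step gets its own group
--             groups.append([(idx, step)])
--
--     # Flush remaining read-only group
--     if current_group:
--         groups.append(current_group)
--
--     return groups
-- ===== SOURCE B (Python) =====
-- READ_ONLY_TOOLS = {
--     "quem_grava", "info_tabela", "operacoes_escrita", "rastrear_condicao",
--     "ver_parametro", "ver_fonte_cliente", "buscar_texto_fonte",
--     "buscar_pes_cliente", "mapear_processo", "buscar_menus",
--     "buscar_propositos", "analise_impacto", "analise_aumento_campo",
--     "processos_cliente", "jobs_schedules", "buscar_fontes_tabela",
--     "fonte_padrao", "pes_disponiveis", "codigo_pe", "buscar_funcao_padrao",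
-- }
--
--
-- def _group_steps_by_parallelism(valid_steps: list) -> list:
--     """Span-based grouping: scan ahead over each read-only run and slice it out."""
--     def is_ro(item):
--         return item[1].get("tool", "") in READ_ONLY_TOOLS
--
--     groups = []
--     i, n = 0, len(valid_steps)
--     while i < n:
--         if is_ro(valid_steps[i]):
--             j = i + 1
--             while j < n and is_ro(valid_steps[j]):
--                 j += 1
--             groups.append(valid_steps[i:j])
--             i = j
--         else:
--             groups.append([valid_steps[i]])
--             i += 1
--     return groups
-- ===== Notes on version B (the rewrite author's own statement) =====
-- stated objective: alternative
-- what changed: Replaces A's accumulator-and-flush fold (mutable current_group flushed at each non-read-only step and at the end) with a span-based scan that detects each read-only run's end with an inner scan and slices the whole run out at once.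
import Mathlib
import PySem

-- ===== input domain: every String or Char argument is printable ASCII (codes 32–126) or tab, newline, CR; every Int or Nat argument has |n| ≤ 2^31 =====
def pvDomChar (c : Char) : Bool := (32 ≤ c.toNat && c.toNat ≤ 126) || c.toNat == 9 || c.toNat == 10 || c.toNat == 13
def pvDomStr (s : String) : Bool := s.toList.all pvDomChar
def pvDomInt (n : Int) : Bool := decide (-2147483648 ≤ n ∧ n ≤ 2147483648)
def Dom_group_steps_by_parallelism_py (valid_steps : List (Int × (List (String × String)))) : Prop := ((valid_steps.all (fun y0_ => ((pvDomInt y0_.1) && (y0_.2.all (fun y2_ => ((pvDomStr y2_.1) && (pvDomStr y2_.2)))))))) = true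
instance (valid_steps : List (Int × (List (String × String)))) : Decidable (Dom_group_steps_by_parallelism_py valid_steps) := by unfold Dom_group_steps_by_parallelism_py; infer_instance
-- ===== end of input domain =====

-- B changes the traversal: instead of A's accumulator-and-flush fold, B scans ahead over each
-- read-only run and slices it out in one span (objective: alternative; same cost).

-- Module constant READ_ONLY_TOOLS (a Python set of string literals; membership test only)
def pvReadOnlyTools : List String :=
  ["quem_grava", "info_tabela", "operacoes_escrita", "rastrear_condicao",
   "ver_parametro", "ver_fonte_cliente", "buscar_texto_fonte",
   "buscar_pes_cliente", "mapear_processo", "buscar_menus",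
   "buscar_propositos", "analise_impacto", "analise_aumento_campo",
   "processos_cliente", "jobs_schedules", "buscar_fontes_tabela",
   "fonte_padrao", "pes_disponiveis", "codigo_pe", "buscar_funcao_padrao"]

-- step.get("tool", "") in READ_ONLY_TOOLS  (shared module-level expression of both versions)
def pvIsRO (p : Int × (List (String × String))) : Bool :=
  pvReadOnlyTools.contains ((PySem.Dict.mk p.2).getD "tool" "")

-- ===== PORT A =====
-- the for-loop of A with its two mutable accumulators (groups, current_group)
def pvALoop (xs : List (Int × (List (String × String))))
    (groups : List (List (Int × (List (String × String)))))
    (cur : List (Int × (List (String × String)))) :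
    List (List (Int × (List (String × String)))) :=
  match xs with
  | [] => if cur.isEmpty then groups else groups ++ [cur]
  | x :: rest =>
    if pvIsRO x then
      pvALoop rest groups (cur ++ [x])
    else
      pvALoop rest ((if cur.isEmpty then groups else groups ++ [cur]) ++ [[x]]) []

def group_steps_by_parallelism_py (valid_steps : List (Int × (List (String × String)))) : List (List (Int × (List (String × String)))) :=
  if valid_steps.isEmpty then [] else pvALoop valid_steps [] []

-- ===== PORT B =====
-- the outer while-loop of B: a read-only head takes its whole span (inner while = takeWhile),
-- a non-read-only head becomes a singleton group
def group_steps_by_parallelism_py_alt (valid_steps : List (Int × (List (String × String)))) : List (List (Int × (List (String × String)))) :=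
  match valid_steps with
  | [] => []
  | x :: xs =>
    if pvIsRO x then
      (x :: xs.takeWhile pvIsRO) :: group_steps_by_parallelism_py_alt (xs.dropWhile pvIsRO)
    else
      [x] :: group_steps_by_parallelism_py_alt xs
termination_by valid_steps.length
decreasing_by
  · exact Nat.lt_succ_of_le (List.length_dropWhile_le _ _)
  · exact Nat.lt_succ_of_le (Nat.le_refl _)

-- ===== PRECONDITION & SPEC =====
def Spec_group_steps_by_parallelism_py (valid_steps : List (Int × (List (String × String)))) (out : List (List (Int × (List (String × String))))) : Prop := out = group_steps_by_parallelism_py_alt valid_steps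
instance (valid_steps : List (Int × (List (String × String)))) (out : List (List (Int × (List (String × String))))) : Decidable (Spec_group_steps_by_parallelism_py valid_steps out) := by unfold Spec_group_steps_by_parallelism_py; infer_instance

-- ===== CLAIM (what is proved, stated in full; the proofs are below) =====
def Claim_equal_group_steps_by_parallelism_py : Prop := ∀ (valid_steps : List (Int × (List (String × String)))), Dom_group_steps_by_parallelism_py valid_steps → Spec_group_steps_by_parallelism_py valid_steps (group_steps_by_parallelism_py valid_steps)

-- ===== LEMMAS AND PROOFS =====

-- proof-only characterisation of A's loop result without the `groups` accumulator
def pvG (cur xs : List (Int × (List (String × String)))) :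
    List (List (Int × (List (String × String)))) :=
  match xs with
  | [] => if cur.isEmpty then [] else [cur]
  | x :: rest =>
    if pvIsRO x then pvG (cur ++ [x]) rest
    else (if cur.isEmpty then [] else [cur]) ++ [[x]] ++ pvG [] rest

theorem pvALoop_eq_pvG (xs : List (Int × (List (String × String))))
    (groups : List (List (Int × (List (String × String)))))
    (cur : List (Int × (List (String × String)))) :
    pvALoop xs groups cur = groups ++ pvG cur xs := by
  induction xs generalizing groups cur with
  | nil => simp [pvALoop, pvG]; split <;> simp
  | cons x rest ih =>
    simp only [pvALoop, pvG]
    split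
    · exact ih _ _
    · rw [ih]; split <;> simp

theorem pvG_span (xs cur : List (Int × (List (String × String)))) :
    pvG cur xs =
      (if (cur ++ xs.takeWhile pvIsRO).isEmpty then [] else [cur ++ xs.takeWhile pvIsRO])
        ++ pvG [] (xs.dropWhile pvIsRO) := by
  induction xs generalizing cur with
  | nil => simp [pvG]
  | cons x rest ih =>
    by_cases h : pvIsRO x = true
    · simp only [pvG, h, if_pos, List.takeWhile_cons, List.dropWhile_cons]
      rw [ih (cur ++ [x])]
      simp
    · have hx : pvIsRO x = false := by simpa using h
      rw [List.takeWhile_cons_of_neg (by simp [hx]), List.dropWhile_cons_of_neg (by simp [hx])]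
      simp [pvG, hx]

theorem pvG_eq_alt (xs : List (Int × (List (String × String)))) :
    pvG [] xs = group_steps_by_parallelism_py_alt xs := by
  induction hn : xs.length using Nat.strong_induction_on generalizing xs with
  | _ n ih =>
    match xs, hn with
    | [], _ => simp [pvG, group_steps_by_parallelism_py_alt]
    | x :: rest, hn =>
      by_cases h : pvIsRO x = true
      · rw [group_steps_by_parallelism_py_alt]
        simp only [h, if_true]
        have hstep : pvG [] (x :: rest) =
            (x :: rest.takeWhile pvIsRO) :: pvG [] (rest.dropWhile pvIsRO) := by
          simp only [pvG, h, if_true, List.nil_append]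
          rw [pvG_span rest [x]]
          simp
        rw [hstep]
        have hlt : (rest.dropWhile pvIsRO).length < n := by
          subst hn
          exact Nat.lt_succ_of_le (List.length_dropWhile_le _ _)
        rw [ih _ hlt _ rfl]
      · rw [group_steps_by_parallelism_py_alt]
        simp only [h, if_false, Bool.false_eq_true]
        have hstep : pvG [] (x :: rest) = [x] :: pvG [] rest := by
          simp [pvG, h]
        rw [hstep]
        have hlt : rest.length < n := by subst hn; exact Nat.lt_succ_of_le (Nat.le_refl _)
        rw [ih _ hlt _ rfl]

-- ===== VERDICT (by name: the statement is the Claim_ definition above) =====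
theorem group_steps_by_parallelism_py_spec : Claim_equal_group_steps_by_parallelism_py := by
  intro vs _
  unfold Spec_group_steps_by_parallelism_py group_steps_by_parallelism_py
  cases vs with
  | nil => simp [group_steps_by_parallelism_py_alt]
  | cons x xs =>
    simp only [List.isEmpty_cons, if_false, Bool.false_eq_true]
    rw [pvALoop_eq_pvG, List.nil_append, pvG_eq_alt]
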